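-- pv_equiv track=rewrite | github.com/CraigyBabyJ/Aviation-hub | data_fetch/src/widget_server.py | _extract_observed_metar
-- ===== SOURCE A (Python) =====
-- def _extract_report(raw_text: str | None) -> str:
--     text = (raw_text or "").upper().strip()
--     if " RMK " in text:
--         text = text.split(" RMK ", 1)[0]
--     return text
--
-- def _extract_observed_metar(raw_text: str | None) -> str:
--     report = _extract_report(raw_text)
--     trend_tokens = (" TEMPO ", " BECMG ", " NOSIG ", " PROB30 ", " PROB40 ")
--     cut_index = len(report)
--     for token in trend_tokens:
--         found = report.find(token)
--         if found != -1:
--             cut_index = min(cut_index, found)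
--     return report[:cut_index].strip()
-- ===== SOURCE B (Python) =====
-- def _extract_observed_metar(raw_text):
--     text = (raw_text or "").upper().strip()
--     if " RMK " in text:
--         text = text.split(" RMK ", 1)[0]
--     tokens = (" TEMPO ", " BECMG ", " NOSIG ", " PROB30 ", " PROB40 ")
--     for i in range(len(text)):
--         if text.startswith(tokens, i):
--             return text[:i].strip()
--     return text.strip()
-- ===== Notes on version B (the rewrite author's own statement) =====
-- stated objective: alternative
-- what changed: Replaces the five separate find scans plus running min with a single left-to-right scan that stops at the first position where any trend token starts (leftmost-match semantics).
import Mathlib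
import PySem

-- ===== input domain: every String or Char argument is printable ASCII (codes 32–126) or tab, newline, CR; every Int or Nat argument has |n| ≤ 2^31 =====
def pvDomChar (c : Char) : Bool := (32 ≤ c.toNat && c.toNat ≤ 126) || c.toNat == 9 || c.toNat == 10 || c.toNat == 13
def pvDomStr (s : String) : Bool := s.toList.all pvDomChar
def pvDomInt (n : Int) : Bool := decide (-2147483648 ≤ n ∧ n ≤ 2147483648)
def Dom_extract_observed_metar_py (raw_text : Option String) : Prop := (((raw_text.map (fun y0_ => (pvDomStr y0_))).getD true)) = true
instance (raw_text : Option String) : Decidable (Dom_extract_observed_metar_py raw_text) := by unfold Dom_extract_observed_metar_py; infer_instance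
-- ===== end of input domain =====

-- B replaces A's five repeated `str.find` scans + running minimum by a single
-- left-to-right scan stopping at the first position where any trend token starts
-- (objective: alternative; same return value everywhere).

-- ===== PORT A =====
def extract_report_py (raw_text : Option String) : String :=
  let text := PySem.Str.strip (PySem.Str.upper (raw_text.getD ""))
  if PySem.Str.isIn " RMK " text then
    ((PySem.Str.splitMax? text " RMK " 1).getD []).headD ""
  else text

def extract_observed_metar_py (raw_text : Option String) : String :=
  let report := extract_report_py raw_text
  let trend_tokens : List String := [" TEMPO ", " BECMG ", " NOSIG ", " PROB30 ", " PROB40 "]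
  let cut_index : Int := trend_tokens.foldl (fun cut tok =>
      let found := PySem.Str.find report tok
      if found ≠ -1 then min cut found else cut) (PySem.Str.len report)
  PySem.Str.strip (PySem.Str.slice report none (some cut_index))

-- ===== PORT B =====
-- `text.startswith(tokens, i)` for i = k, k+1, … scanning the suffix of text at k
def pvTrendScan (toks : List (List Char)) : List Char → Nat → Option Nat
  | [], _ => none
  | c :: rest, k =>
      if toks.any (fun t => PySem.Chars.startswith (c :: rest) t) then some k
      else pvTrendScan toks rest (k + 1)

def extract_observed_metar_py_alt (raw_text : Option String) : String :=
  let text := PySem.Str.strip (PySem.Str.upper (raw_text.getD ""))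
  let text := if PySem.Str.isIn " RMK " text then
      ((PySem.Str.splitMax? text " RMK " 1).getD []).headD ""
    else text
  let toks : List (List Char) :=
    [" TEMPO ".toList, " BECMG ".toList, " NOSIG ".toList, " PROB30 ".toList, " PROB40 ".toList]
  match pvTrendScan toks text.toList 0 with
  | some i => PySem.Str.strip (String.ofList (text.toList.take i))
  | none => PySem.Str.strip text

-- ===== PRECONDITION & SPEC =====
def Spec_extract_observed_metar_py (raw_text : Option String) (out : String) : Prop := out = extract_observed_metar_py_alt raw_text
instance (raw_text : Option String) (out : String) : Decidable (Spec_extract_observed_metar_py raw_text out) := by unfold Spec_extract_observed_metar_py; infer_instance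

-- ===== CLAIM (what is proved, stated in full; the proofs are below) =====
def Claim_equal_extract_observed_metar_py : Prop := ∀ (raw_text : Option String), Dom_extract_observed_metar_py raw_text → Spec_extract_observed_metar_py raw_text (extract_observed_metar_py raw_text)

-- ===== LEMMAS AND PROOFS =====
-- helper definitions used only by the proofs
def pvToks : List (List Char) :=
  [" TEMPO ".toList, " BECMG ".toList, " NOSIG ".toList, " PROB30 ".toList, " PROB40 ".toList]

def pvStrToks : List String := [" TEMPO ", " BECMG ", " NOSIG ", " PROB30 ", " PROB40 "]

def pvHit (cs : List Char) (i : Nat) : Prop := ∃ t ∈ pvToks, t <+: cs.drop i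

theorem pvToks_ne : ∀ t ∈ pvToks, t ≠ [] := by decide

theorem pvToks_mem_str : ∀ t ∈ pvToks, ∃ s ∈ pvStrToks, s.toList = t := by decide

theorem pvStrToks_mem : ∀ s ∈ pvStrToks, s.toList ∈ pvToks := by decide

theorem pvTrendScan_none (l : List Char) (k : Nat)
    (h : pvTrendScan pvToks l k = none) : ∀ i, ¬ pvHit l i := by
  induction l generalizing k with
  | nil =>
    rintro i ⟨t, ht, hp⟩
    simp only [List.drop_nil, List.prefix_nil] at hp
    exact pvToks_ne t ht hp
  | cons c rest ih =>
    intro i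
    rw [pvTrendScan] at h
    by_cases htest : (pvToks.any (fun t => PySem.Chars.startswith (c :: rest) t)) = true
    · rw [if_pos htest] at h; exact absurd h (Option.some_ne_none k)
    · rw [if_neg htest] at h
      match i with
      | 0 =>
        rintro ⟨t, ht, hp⟩
        simp only [List.any_eq_true, not_exists, not_and, PySem.Chars.startswith] at htest
        exact htest t ht (List.isPrefixOf_iff_prefix.mpr (by simpa using hp))
      | j + 1 =>
        rintro ⟨t, ht, hp⟩
        exact ih (k + 1) h j ⟨t, ht, by simpa using hp⟩

theorem pvTrendScan_some (l : List Char) (k m : Nat)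
    (h : pvTrendScan pvToks l k = some m) :
    k ≤ m ∧ pvHit l (m - k) ∧ ∀ i < m - k, ¬ pvHit l i := by
  induction l generalizing k with
  | nil => rw [pvTrendScan] at h; exact absurd h (by simp)
  | cons c rest ih =>
    rw [pvTrendScan] at h
    split_ifs at h with htest
    · have hm : m = k := by simpa using h.symm
      subst hm
      refine ⟨le_refl _, ?_, by omega⟩
      simp only [List.any_eq_true, PySem.Chars.startswith] at htest
      obtain ⟨t, ht, hp⟩ := htest
      exact ⟨t, ht, by simpa using List.isPrefixOf_iff_prefix.mp hp⟩
    · obtain ⟨hk, hhit, hmin⟩ := ih (k + 1) h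
      refine ⟨by omega, ?_, ?_⟩
      · obtain ⟨t, ht, hp⟩ := hhit
        refine ⟨t, ht, ?_⟩
        have : m - k = (m - (k + 1)) + 1 := by omega
        rw [this]
        simpa using hp
      · intro i hi
        match i with
        | 0 =>
          rintro ⟨t, ht, hp⟩
          simp only [List.any_eq_true, not_exists, not_and, PySem.Chars.startswith] at htest
          exact htest t ht (List.isPrefixOf_iff_prefix.mpr (by simpa using hp))
        | j + 1 =>
          rintro ⟨t, ht, hp⟩
          exact hmin j (by omega) ⟨t, ht, by simpa using hp⟩

theorem pvFold_le_init (r : String) (ts : List String) (a : Int) :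
    ts.foldl (fun cut tok =>
      let found := PySem.Str.find r tok
      if found ≠ -1 then min cut found else cut) a ≤ a := by
  induction ts generalizing a with
  | nil => exact le_refl a
  | cons u us ih =>
    simp only [List.foldl_cons]
    refine le_trans (ih _) ?_
    split_ifs with h
    · exact min_le_left _ _
    · exact le_refl _

theorem pvFold_le_mem (r : String) (t : String) (ts : List String) (a : Int)
    (ht : t ∈ ts) (hf : PySem.Str.find r t ≠ -1) :
    ts.foldl (fun cut tok =>
      let found := PySem.Str.find r tok
      if found ≠ -1 then min cut found else cut) a ≤ PySem.Str.find r t := by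
  induction ts generalizing a with
  | nil => simp at ht
  | cons u us ih =>
    simp only [List.foldl_cons]
    rcases List.mem_cons.mp ht with rfl | hmem
    · refine le_trans (pvFold_le_init r us _) ?_
      simp only [if_pos hf]
      exact min_le_right _ _
    · exact ih _ hmem

theorem pvFold_cases (r : String) (ts : List String) (a : Int) :
    (ts.foldl (fun cut tok =>
      let found := PySem.Str.find r tok
      if found ≠ -1 then min cut found else cut) a = a) ∨
    (∃ t ∈ ts, PySem.Str.find r t ≠ -1 ∧
      ts.foldl (fun cut tok =>
        let found := PySem.Str.find r tok
        if found ≠ -1 then min cut found else cut) a = PySem.Str.find r t) := by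
  induction ts generalizing a with
  | nil => exact Or.inl rfl
  | cons u us ih =>
    simp only [List.foldl_cons]
    by_cases hu : PySem.Str.find r u ≠ -1
    · simp only [if_pos hu]
      rcases ih (min a (PySem.Str.find r u)) with h | ⟨t, ht, htne, h⟩
      · rcases min_cases a (PySem.Str.find r u) with ⟨hmin, _⟩ | ⟨hmin, _⟩
        · exact Or.inl (h.trans hmin)
        · exact Or.inr ⟨u, List.mem_cons_self, hu, h.trans hmin⟩
      · exact Or.inr ⟨t, List.mem_cons_of_mem _ ht, htne, h⟩
    · simp only [if_neg hu]
      rcases ih a with h | ⟨t, ht, htne, h⟩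
      · exact Or.inl h
      · exact Or.inr ⟨t, List.mem_cons_of_mem _ ht, htne, h⟩

theorem pvFind_neg_or (s sub : String) :
    PySem.Str.find s sub = -1 ∨ 0 ≤ PySem.Str.find s sub := by
  by_cases h : sub.toList <:+: s.toList
  · exact Or.inr ((PySem.Chars.find_nonneg_iff _ _).mpr h)
  · exact Or.inl ((PySem.Chars.find_eq_neg_one_iff _ _).mpr h)

theorem pvHit_of_find_nonneg (r : String) (s : String) (hs : s ∈ pvStrToks)
    (h : 0 ≤ PySem.Str.find r s) : pvHit r.toList (PySem.Str.find r s).toNat :=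
  ⟨s.toList, pvStrToks_mem s hs,
    (PySem.Chars.find_spec (s := r.toList) (sub := s.toList) h).1⟩

theorem pvCore (r : String) :
    PySem.Str.strip (PySem.Str.slice r none (some
      (pvStrToks.foldl (fun cut tok =>
        let found := PySem.Str.find r tok
        if found ≠ -1 then min cut found else cut) (PySem.Str.len r))))
    = (match pvTrendScan pvToks r.toList 0 with
      | some i => PySem.Str.strip (String.ofList (r.toList.take i))
      | none => PySem.Str.strip r) := by
  set cut := pvStrToks.foldl (fun cut tok =>
      let found := PySem.Str.find r tok
      if found ≠ -1 then min cut found else cut) (PySem.Str.len r) with hcutdef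
  cases hscan : pvTrendScan pvToks r.toList 0 with
  | none =>
    have hnone := pvTrendScan_none _ _ hscan
    have hfind : ∀ t ∈ pvStrToks, PySem.Str.find r t = -1 := by
      intro t ht
      rcases pvFind_neg_or r t with h | h
      · exact h
      · exact absurd (pvHit_of_find_nonneg r t ht h) (hnone _)
    have hcut : cut = PySem.Str.len r := by
      rcases pvFold_cases r pvStrToks (PySem.Str.len r) with h | ⟨t, ht, htne, _⟩
      · exact h
      · exact absurd (hfind t ht) htne
    rw [hcut]
    simp only [PySem.Str.strip, PySem.Str.slice, PySem.Chars.slice, PySem.Str.len]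
    rw [PySem.List.slice_to_natCast, List.take_length]
    simp
  | some m =>
    obtain ⟨-, hhit, hmin⟩ := pvTrendScan_some _ _ _ hscan
    simp only [Nat.sub_zero] at hhit hmin
    obtain ⟨t0, ht0, hp0⟩ := hhit
    obtain ⟨s0, hs0, hs0t⟩ := pvToks_mem_str t0 ht0
    have hmlt : m < r.toList.length := by
      by_contra hge
      rw [List.drop_eq_nil_iff.mpr (by omega)] at hp0
      exact pvToks_ne t0 ht0 (List.prefix_nil.mp hp0)
    have hfeq0 : PySem.Str.find r s0 = PySem.Chars.find r.toList s0.toList := rfl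
    have hf0 : 0 ≤ PySem.Chars.find r.toList s0.toList := by
      refine (PySem.Chars.find_nonneg_iff _ _).mpr ?_
      rw [hs0t]
      exact List.infix_iff_prefix_suffix.mpr ⟨r.toList.drop m, hp0, List.drop_suffix m r.toList⟩
    have hf0le : (PySem.Chars.find r.toList s0.toList).toNat ≤ m := by
      by_contra hlt
      have hnp := (PySem.Chars.find_spec (s := r.toList) (sub := s0.toList) hf0).2 m (by omega)
      rw [hs0t] at hnp
      exact hnp hp0
    have hle : cut ≤ (m : Int) := by
      refine le_trans (pvFold_le_mem r s0 pvStrToks _ hs0 (by rw [hfeq0]; omega)) ?_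
      rw [hfeq0, ← Int.toNat_of_nonneg hf0]
      exact_mod_cast hf0le
    have hge : (m : Int) ≤ cut := by
      rcases pvFold_cases r pvStrToks (PySem.Str.len r) with h | ⟨t, ht, htne, h⟩
      · rw [← hcutdef] at h
        exfalso
        rw [h] at hle
        simp only [PySem.Str.len] at hle
        have : r.toList.length ≤ m := by exact_mod_cast hle
        omega
      · rw [← hcutdef] at h
        have hfeqt : PySem.Str.find r t = PySem.Chars.find r.toList t.toList := rfl
        have hfnn : 0 ≤ PySem.Chars.find r.toList t.toList := by
          rcases pvFind_neg_or r t with h' | h'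
          · exact absurd h' htne
          · rw [hfeqt] at h'; exact h'
        have hhit' : pvHit r.toList (PySem.Chars.find r.toList t.toList).toNat :=
          ⟨t.toList, pvStrToks_mem t ht,
            (PySem.Chars.find_spec (s := r.toList) (sub := t.toList) hfnn).1⟩
        have hnm : ¬ (PySem.Chars.find r.toList t.toList).toNat < m := fun hh => hmin _ hh hhit'
        rw [h, hfeqt, ← Int.toNat_of_nonneg hfnn]
        exact_mod_cast by omega
    have hcut : cut = (m : Int) := le_antisymm hle hge
    rw [hcut]
    simp only [PySem.Str.strip, PySem.Str.slice, PySem.Chars.slice]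
    rw [PySem.List.slice_to_natCast]

-- ===== VERDICT (by name: the statement is the Claim_ definition above) =====
theorem extract_observed_metar_py_spec : Claim_equal_extract_observed_metar_py := by
  intro raw_text _
  show extract_observed_metar_py raw_text = extract_observed_metar_py_alt raw_text
  unfold extract_observed_metar_py extract_observed_metar_py_alt
  have h := pvCore (extract_report_py raw_text)
  unfold extract_report_py at h
  simp only [pvStrToks, pvToks] at h
  exact h
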